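-- pv_equiv track=rewrite | github.com/wilkin547/MAKE_Questions.py | python/python/practica 2.py | estructura_frase
-- ===== SOURCE A (Python) =====
-- def comprueba_verbs(frase):
--
--
--     verbos = ["is","are","run","go","stay","swim"]
--
--     for verb in verbos:
--
--         if frase == verb + " ":
--             return True
--
--     return False
--
-- def estructura_frase(palabras):
--     complento = ""
--     sujeto = ""
--     vervo = ""
--
--     isSubect = True
--     isComplemto = False
--     isVerb = False
--
--
--     for word in palabras:
--
--
--         if comprueba_verbs(word):
--
--             isSubect = False
--             isVerb = True
--
--         if isSubect :
--
--             sujeto += word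
--
--
--         if isVerb :
--
--             vervo += word
--             isComplemto = True
--             isVerb = False
--             continue
--
--
--         if isComplemto :
--
--             complento += word
--
--
--     texto = {
--         "sujeto" : sujeto,
--         "verbo"  : vervo,
--         "complento" : complento
--     }
--     return texto
-- ===== SOURCE B (Python) =====
-- def comprueba_verbs(frase):
--
--
--     verbos = ["is","are","run","go","stay","swim"]
--
--     for verb in verbos:
--
--         if frase == verb + " ":
--             return True
--
--     return False
--
-- def estructura_frase(palabras):
--     words = list(palabras)
--     idx = next((i for i, w in enumerate(words) if comprueba_verbs(w)), len(words))
--     sujeto = "".join(words[:idx])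
--     resto = words[idx:]
--     verbo = "".join(w for w in resto if comprueba_verbs(w))
--     complemento = "".join(w for w in resto if not comprueba_verbs(w))
--     return {"sujeto": sujeto, "verbo": verbo, "complento": complemento}
-- ===== Notes on version B (the rewrite author's own statement) =====
-- stated objective: simpler
-- what changed: Replaced the stateful flag-machine loop (isSubect/isVerb/isComplemto with continue) by a split-point computation: find the index of the first verb, join the prefix as sujeto, and partition the remainder into verb/non-verb words for verbo/complemento.
import Mathlib
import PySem

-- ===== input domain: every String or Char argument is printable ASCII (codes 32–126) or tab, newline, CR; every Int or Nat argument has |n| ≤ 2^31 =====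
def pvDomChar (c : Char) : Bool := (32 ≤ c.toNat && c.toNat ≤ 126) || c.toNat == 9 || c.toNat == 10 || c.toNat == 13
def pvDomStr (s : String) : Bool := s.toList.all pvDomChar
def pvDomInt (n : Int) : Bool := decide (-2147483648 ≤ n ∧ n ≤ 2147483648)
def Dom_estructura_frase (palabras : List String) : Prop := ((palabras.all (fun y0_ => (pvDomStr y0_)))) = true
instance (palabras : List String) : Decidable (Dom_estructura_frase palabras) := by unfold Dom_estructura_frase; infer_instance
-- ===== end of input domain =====

-- B replaces A's stateful flag machine by a split at the first verb plus two filtered joins (simpler decomposition, same cost).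

-- ===== PORT A =====
-- helper shared by both Pythons: word is a verb followed by a space (early-return loop over the verb list = any)
def comprueba_verbs (frase : String) : Bool :=
  (["is", "are", "run", "go", "stay", "swim"] : List String).foldl
    (fun acc verb => acc || (frase == verb ++ " ")) false

-- one iteration of A's for-loop: state = (sujeto, vervo, complento, isSubect, isVerb, isComplemto)
def pvStepA (st : String × String × String × Bool × Bool × Bool) (word : String) :
    String × String × String × Bool × Bool × Bool :=
  let (sujeto, vervo, complento, isSubect, isVerb, isComplemto) := st
  let (isSubect, isVerb) := if comprueba_verbs word then (false, true) else (isSubect, isVerb)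
  let sujeto := if isSubect then sujeto ++ word else sujeto
  if isVerb then
    -- vervo += word; isComplemto = True; isVerb = False; continue
    (sujeto, vervo ++ word, complento, isSubect, false, true)
  else
    let complento := if isComplemto then complento ++ word else complento
    (sujeto, vervo, complento, isSubect, isVerb, isComplemto)

def estructura_frase (palabras : List String) : List (String × String) :=
  let st := palabras.foldl pvStepA ("", "", "", true, false, false)
  [("sujeto", st.1), ("verbo", st.2.1), ("complento", st.2.2.1)]

-- ===== PORT B =====
-- "".join(ws)
def pvJoin (ws : List String) : String := ws.foldl (· ++ ·) ""

def estructura_frase_alt (palabras : List String) : List (String × String) :=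
  let words := palabras
  let idx := words.findIdx (fun w => comprueba_verbs w)
  let sujeto := pvJoin (words.take idx)
  let resto := words.drop idx
  let verbo := pvJoin (resto.filter (fun w => comprueba_verbs w))
  let complemento := pvJoin (resto.filter (fun w => !comprueba_verbs w))
  [("sujeto", sujeto), ("verbo", verbo), ("complento", complemento)]

-- ===== PRECONDITION & SPEC =====
def Spec_estructura_frase (palabras : List String) (out : List (String × String)) : Prop := out = estructura_frase_alt palabras
instance (palabras : List String) (out : List (String × String)) : Decidable (Spec_estructura_frase palabras out) := by unfold Spec_estructura_frase; infer_instance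

-- ===== CLAIM (what is proved, stated in full; the proofs are below) =====
def Claim_equal_estructura_frase : Prop := ∀ (palabras : List String), Dom_estructura_frase palabras → Spec_estructura_frase palabras (estructura_frase palabras)

-- ===== LEMMAS AND PROOFS =====

theorem pvJoin_acc (l : List String) : ∀ (v : String), l.foldl (· ++ ·) v = v ++ pvJoin l := by
  induction l with
  | nil =>
      intro v
      simp only [pvJoin, List.foldl_nil]
      exact String.append_empty.symm
  | cons a t ih =>
      intro v
      have h2 : pvJoin (a :: t) = a ++ pvJoin t := by
        rw [show pvJoin (a :: t) = List.foldl (· ++ ·) ("" ++ a) t from rfl,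
          ih ("" ++ a), String.empty_append]
      rw [List.foldl_cons, ih (v ++ a), h2, String.append_assoc]

theorem pvJoin_nil : pvJoin [] = "" := rfl

theorem pvJoin_cons (a : String) (l : List String) : pvJoin (a :: l) = a ++ pvJoin l := by
  rw [show pvJoin (a :: l) = List.foldl (· ++ ·) ("" ++ a) l from rfl,
    pvJoin_acc, String.empty_append]

-- after the first verb has been seen, A's loop appends verb words to vervo and the rest to complento
theorem pvStepA_post (l : List String) : ∀ (s v c : String),
    l.foldl pvStepA (s, v, c, false, false, true) =
      (s, v ++ pvJoin (l.filter (fun w => comprueba_verbs w)),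
          c ++ pvJoin (l.filter (fun w => !comprueba_verbs w)), false, false, true) := by
  induction l with
  | nil => intro s v c; simp [pvJoin]
  | cons w t ih =>
      intro s v c
      by_cases hw : comprueba_verbs w = true
      · simp [pvStepA, hw, ih, pvJoin_cons, String.append_assoc]
      · simp [pvStepA, hw, ih, pvJoin_cons, String.append_assoc]

-- before a verb has been seen, A's loop accumulates the prefix into sujeto up to the first verb
theorem pvStepA_pre (l : List String) : ∀ (s : String),
    l.foldl pvStepA (s, "", "", true, false, false) =
      (s ++ pvJoin (l.take (l.findIdx (fun w => comprueba_verbs w))),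
       pvJoin ((l.drop (l.findIdx (fun w => comprueba_verbs w))).filter (fun w => comprueba_verbs w)),
       pvJoin ((l.drop (l.findIdx (fun w => comprueba_verbs w))).filter (fun w => !comprueba_verbs w)),
       l.findIdx (fun w => comprueba_verbs w) == l.length, false,
       !(l.findIdx (fun w => comprueba_verbs w) == l.length)) := by
  induction l with
  | nil => intro s; simp [pvJoin]
  | cons w t ih =>
      intro s
      by_cases hw : comprueba_verbs w = true
      · simp only [List.foldl_cons, pvStepA, hw, if_true, Bool.false_eq_true, if_false]
        rw [pvStepA_post]
        simp [List.findIdx_cons, hw, pvJoin_cons, pvJoin_nil, String.append_empty]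
      · simp only [List.foldl_cons, pvStepA, hw, Bool.false_eq_true, if_false, if_true]
        rw [ih (s ++ w)]
        simp [List.findIdx_cons, hw, pvJoin_cons, String.append_assoc]

-- ===== VERDICT (by name: the statement is the Claim_ definition above) =====
theorem estructura_frase_spec : Claim_equal_estructura_frase := by
  intro palabras _
  unfold Spec_estructura_frase estructura_frase estructura_frase_alt
  rw [pvStepA_pre]
  simp
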